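-- pv_equiv track=rewrite | github.com/freddydrew/HackerRank | 30DaysToCode/RunTimePractice.py | FindDupesv2
-- ===== SOURCE A (Python) =====
-- def FindDupesv2(string,char): #accepts two strings, iterates through them
--     sums = {} #empty frequency table
--     for c in char: #O(n)
--         for s in string: #O(n) * O(m) --> O(n*m)
--             if s in sums and s == c:
--                 sums[c] += 1
--             if s not in sums and s == c:
--                 sums[c] = 1
--     return sums
-- ===== SOURCE B (Python) =====
-- def FindDupesv2(string, char):
--     # Build two frequency tables, then one pass over the distinct chars of `char`:
--     # each key present in `string` maps to (multiplicity in char) * (count in string).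
--     sc = {}
--     for s in string:
--         sc[s] = sc.get(s, 0) + 1
--     cc = {}
--     for c in char:
--         cc[c] = cc.get(c, 0) + 1
--     return {c: n * sc[c] for c, n in cc.items() if c in sc}
-- ===== Notes on version B (the rewrite author's own statement) =====
-- stated objective: faster
-- what changed: Replaces A's nested per-occurrence double scan (for every occurrence in char, rescanning all of string with per-step dict membership tests) by building two frequency tables in single passes and emitting each result entry as the product of two counts in one pass over the distinct chars of char.
import Mathlib
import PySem

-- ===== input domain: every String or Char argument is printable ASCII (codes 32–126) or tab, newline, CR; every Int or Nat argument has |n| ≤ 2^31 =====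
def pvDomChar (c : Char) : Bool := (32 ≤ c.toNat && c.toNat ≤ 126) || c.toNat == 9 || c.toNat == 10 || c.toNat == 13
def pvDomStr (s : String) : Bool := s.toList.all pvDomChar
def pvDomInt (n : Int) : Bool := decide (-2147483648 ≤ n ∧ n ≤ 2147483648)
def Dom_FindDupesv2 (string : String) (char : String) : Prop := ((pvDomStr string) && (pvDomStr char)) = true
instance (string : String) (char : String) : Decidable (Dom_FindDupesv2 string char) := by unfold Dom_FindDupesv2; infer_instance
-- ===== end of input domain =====

-- B replaces A's nested per-occurrence scans by two frequency tables and one product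
-- pass over the distinct chars of `char`: O(n+m) instead of O(n*m) (measured faster). Python dict keys are
-- 1-char strings; they are rendered as `String.ofList [k]` here.

-- ===== PORT A =====
-- one step of A's inner `for s in string` loop (the two sequential `if`s)
def pvAstep (c : Char) (sums : PySem.Dict Char Int) (s : Char) : PySem.Dict Char Int :=
  let sums := if sums.contains s && (s == c) then sums.modify c 0 (· + 1) else sums
  if (!sums.contains s) && (s == c) then sums.insert c 1 else sums

-- A's inner loop: `for s in string: …`
def pvAinner (sl : List Char) (c : Char) (sums : PySem.Dict Char Int) : PySem.Dict Char Int :=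
  sl.foldl (pvAstep c) sums

def FindDupesv2 (string : String) (char : String) : List (String × Int) :=
  (char.toList.foldl (fun sums c => pvAinner string.toList c sums)
      PySem.Dict.empty).items.map (fun p => (String.ofList [p.1], p.2))

-- ===== PORT B =====
-- Source B's hand-rolled frequency table: `d[x] = d.get(x, 0) + 1` over a string
def pvFreq (l : List Char) : PySem.Dict Char Int :=
  l.foldl (fun d x => d.insert x (d.getD x 0 + 1)) PySem.Dict.empty

def FindDupesv2_alt (string : String) (char : String) : List (String × Int) :=
  let sc := pvFreq string.toList
  let cc := pvFreq char.toList
  (cc.items.filter (fun p => sc.contains p.1)).map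
    (fun p => (String.ofList [p.1], p.2 * sc.getD p.1 0))

-- ===== PRECONDITION & SPEC =====
def Spec_FindDupesv2 (string : String) (char : String) (out : List (String × Int)) : Prop := out = FindDupesv2_alt string char
instance (string : String) (char : String) (out : List (String × Int)) : Decidable (Spec_FindDupesv2 string char out) := by unfold Spec_FindDupesv2; infer_instance

-- ===== CLAIM (what is proved, stated in full; the proofs are below) =====
def Claim_equal_FindDupesv2 : Prop := ∀ (string : String) (char : String), Dom_FindDupesv2 string char → Spec_FindDupesv2 string char (FindDupesv2 string char)

-- ===== LEMMAS AND PROOFS =====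

-- the common normal form: distinct chars of `cs` occurring in `sl`, in first-occurrence
-- order, valued count-in-cs * count-in-sl
def pvCanon (sl cs : List Char) : List (Char × Int) :=
  ((PySem.Set.ofList cs).filter (fun k => decide (k ∈ sl))).map
    (fun k => (k, (cs.count k : Int) * (sl.count k : Int)))

lemma pvAstep_eq_of_eq (c s : Char) (d : PySem.Dict Char Int) (h : s = c) :
    pvAstep c d s = d.insert c (d.getD c 0 + 1) := by
  subst h
  unfold pvAstep
  by_cases hc : d.contains s = true
  · simp [hc, PySem.Dict.modify, PySem.Dict.contains_insert_self]
  · simp at hc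
    simp [hc, PySem.Dict.getD_of_not_contains d 0 hc]

lemma pvAstep_eq_of_ne (c s : Char) (d : PySem.Dict Char Int) (h : ¬ s = c) :
    pvAstep c d s = d := by
  unfold pvAstep
  simp [h]

lemma pvAinner_eq (sl : List Char) (c : Char) (d : PySem.Dict Char Int) :
    pvAinner sl c d =
      if c ∈ sl then d.insert c (d.getD c 0 + sl.count c) else d := by
  induction sl generalizing d with
  | nil => simp [pvAinner]
  | cons s t ih =>
    by_cases h : s = c
    · subst h
      have : pvAinner (s :: t) s d = pvAinner t s (d.insert s (d.getD s 0 + 1)) := by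
        simp [pvAinner, pvAstep_eq_of_eq s s d rfl]
      rw [this, ih]
      by_cases ht : s ∈ t
      · simp [ht, PySem.Dict.insert_insert_self, PySem.Dict.getD_insert_self,
          List.count_cons_self]
        ring_nf
      · simp [ht, List.count_cons_self, List.count_eq_zero_of_not_mem ht]
    · have hcs : c ≠ s := fun hh => h hh.symm
      simp only [pvAinner, List.foldl_cons, pvAstep_eq_of_ne c s d h]
      rw [show List.foldl (pvAstep c) d t = pvAinner t c d from rfl, ih]
      by_cases hm : c ∈ t
      · simp [hm, h]
      · simp [hm, hcs]

-- keys of the canonical dict state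
lemma pvCanon_keys (sl cs : List Char) :
    (PySem.Dict.mk (pvCanon sl cs)).keys
      = (PySem.Set.ofList cs).filter (fun k => decide (k ∈ sl)) := by
  simp [PySem.Dict.keys, pvCanon, List.map_map, Function.comp_def]

lemma pvCanon_keys_nodup (sl cs : List Char) :
    (PySem.Dict.mk (pvCanon sl cs)).keys.Nodup := by
  rw [pvCanon_keys]
  exact (PySem.Set.nodup_ofList cs).filter _

lemma pvA_items (sl cl : List Char) :
    (cl.foldl (fun sums c => pvAinner sl c sums) PySem.Dict.empty).items
      = pvCanon sl cl := by
  induction cl using List.reverseRecOn with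
  | nil => simp [PySem.Dict.empty, pvCanon, PySem.Set.ofList]
  | append_singleton cs c ih =>
    rw [List.foldl_append, List.foldl_cons, List.foldl_nil]
    have hdmk : cs.foldl (fun sums c => pvAinner sl c sums) PySem.Dict.empty
        = PySem.Dict.mk (pvCanon sl cs) := PySem.Dict.ext ih
    rw [hdmk, pvAinner_eq]
    have hset : PySem.Set.ofList (cs ++ [c])
        = if (PySem.Set.ofList cs).contains c then PySem.Set.ofList cs
          else PySem.Set.ofList cs ++ [c] := by
      simp [PySem.Set.ofList, List.foldl_append, PySem.Set.add]
    have hcont : (PySem.Dict.mk (pvCanon sl cs)).contains c = decide (c ∈ cs ∧ c ∈ sl) := by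
      rw [PySem.Dict.contains_eq_decide_mem_keys, pvCanon_keys]
      simp [List.mem_filter, PySem.Set.mem_ofList]
    by_cases hsl : c ∈ sl
    · simp only [hsl, if_pos]
      by_cases hcs : c ∈ cs
      · -- key already present: insert overwrites in place
        have hc : (PySem.Dict.mk (pvCanon sl cs)).contains c = true := by
          simp [hcont, hcs, hsl]
        have hget : (PySem.Dict.mk (pvCanon sl cs)).getD c 0
            = (cs.count c : Int) * (sl.count c : Int) := by
          refine PySem.Dict.getD_of_mem_items _ ?_ (pvCanon_keys_nodup sl cs) 0
          simp only [pvCanon]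
          exact List.mem_map_of_mem (by simp [List.mem_filter, PySem.Set.mem_ofList, hcs, hsl])
        rw [PySem.Dict.items_insert_of_contains _ _ hc, hget]
        have hsetc : (PySem.Set.ofList cs).contains c = true := by
          simp [PySem.Set.mem_ofList, hcs]
        simp only [pvCanon, hset, hsetc, if_pos, List.map_map]
        apply List.map_congr_left
        intro k hk
        by_cases hkc : k = c
        · subst hkc
          simp only [Function.comp_apply, beq_self_eq_true, if_pos, Prod.mk.injEq, true_and]
          simp [List.count_append]
          ring
        · have hcnt : (cs ++ [c]).count k = cs.count k := by
            simp [List.count_append, Ne.symm hkc]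
          simp [hkc, hcnt]
      · -- fresh key: insert appends
        have hc : (PySem.Dict.mk (pvCanon sl cs)).contains c = false := by
          simp [hcont, hcs]
        have hget : (PySem.Dict.mk (pvCanon sl cs)).getD c 0 = 0 :=
          PySem.Dict.getD_of_not_contains _ 0 hc
        rw [PySem.Dict.items_insert_of_not_contains _ _ hc, hget]
        have hsetc : (PySem.Set.ofList cs).contains c = false := by
          simp [PySem.Set.mem_ofList, hcs]
        simp only [pvCanon, hset, hsetc, Bool.false_eq_true, if_neg,
          not_false_iff, List.filter_append, List.map_append]
        congr 1
        · apply List.map_congr_left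
          intro k hk
          have hkcs : k ∈ cs := PySem.Set.mem_ofList cs k |>.mp (List.mem_filter.mp hk).1
          have hkc : ¬ k = c := fun h => hcs (h ▸ hkcs)
          have hcnt : (cs ++ [c]).count k = cs.count k := by
            simp [List.count_append, Ne.symm hkc]
          simp [hcnt]
        · have hcnt : (cs ++ [c]).count c = cs.count c + 1 := by
            simp [List.count_append]
          simp [hsl, List.count_eq_zero_of_not_mem hcs]
    · -- c not in string: the inner loop does nothing and canon is unchanged
      simp only [hsl, if_neg, not_false_iff]
      by_cases hsetc : (PySem.Set.ofList cs).contains c = true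
      · simp only [pvCanon, hset, hsetc, if_pos]
        apply List.map_congr_left
        intro k hk
        have hksl : k ∈ sl := by
          have := (List.mem_filter.mp hk).2; simpa using this
        have hkc : ¬ k = c := fun h => hsl (h ▸ hksl)
        have hcnt : (cs ++ [c]).count k = cs.count k := by
          simp [List.count_append, Ne.symm hkc]
        simp [hcnt]
      · simp only [Bool.not_eq_true] at hsetc
        simp only [pvCanon, hset, hsetc, Bool.false_eq_true, if_neg,
          not_false_iff, List.filter_append]
        have hfc : List.filter (fun k => decide (k ∈ sl)) [c] = [] := by simp [hsl]
        rw [hfc, List.append_nil]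
        apply List.map_congr_left
        intro k hk
        have hksl : k ∈ sl := by
          have := (List.mem_filter.mp hk).2; simpa using this
        have hkc : ¬ k = c := fun h => hsl (h ▸ hksl)
        have hcnt : (cs ++ [c]).count k = cs.count k := by
          simp [List.count_append, Ne.symm hkc]
        simp [hcnt]

lemma pvB_eq (sl cl : List Char) :
    ((pvFreq cl).items.filter (fun p => (pvFreq sl).contains p.1)).map
        (fun p => (String.ofList [p.1], p.2 * (pvFreq sl).getD p.1 0))
      = (pvCanon sl cl).map (fun p => (String.ofList [p.1], p.2)) := by
  have hfreq : ∀ l : List Char, pvFreq l = PySem.Dict.counter l := by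
    intro l; exact PySem.Dict.foldl_insert_getD_add_one_eq_counter l
  rw [hfreq, hfreq, PySem.Dict.items_counter, List.filter_map, List.map_map, pvCanon,
    List.map_map]
  have hfil : (List.filter ((fun p : Char × Int => (PySem.Dict.counter sl).contains p.1) ∘
        fun k => (k, (cl.count k : Int))) (PySem.Set.ofList cl))
      = (PySem.Set.ofList cl).filter (fun k => decide (k ∈ sl)) := by
    apply List.filter_congr
    intro k _
    simp [Function.comp, PySem.Dict.contains_counter]
  rw [hfil]
  apply List.map_congr_left
  intro k _
  simp [Function.comp, PySem.Dict.getD_counter]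

-- ===== VERDICT (by name: the statement is the Claim_ definition above) =====
theorem FindDupesv2_spec : Claim_equal_FindDupesv2 := by
  intro string char _
  unfold Spec_FindDupesv2 FindDupesv2 FindDupesv2_alt
  rw [pvA_items string.toList char.toList, ← pvB_eq string.toList char.toList]
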